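-- pv_equiv track=rewrite | github.com/JonghwaCho/english-master | text_utils.py | group_into_paragraphs
-- ===== SOURCE A (Python) =====
-- def group_into_paragraphs(sentences, per_paragraph=5):
--     """
--     Assign paragraph indices to sentences.
--     Returns list of (paragraph_idx, sentence_idx, text, None, None).
--     """
--     result = []
--     para_idx = 0
--     sent_idx = 0
--     for s in sentences:
--         result.append((para_idx, sent_idx, s, None, None))
--         sent_idx += 1
--         if sent_idx >= per_paragraph:
--             para_idx += 1
--             sent_idx = 0
--     return result
-- ===== SOURCE B (Python) =====
-- def group_into_paragraphs(sentences, per_paragraph=5):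
--     """
--     Assign paragraph indices to sentences.
--     Returns list of (paragraph_idx, sentence_idx, text, None, None).
--     """
--     k = per_paragraph if per_paragraph >= 1 else 1
--     paragraphs = []
--     rest = sentences
--     while rest:
--         paragraphs.append(rest[:k])
--         rest = rest[k:]
--     return [(p, s, text, None, None)
--             for p, para in enumerate(paragraphs)
--             for s, text in enumerate(para)]
-- ===== Notes on version B (the rewrite author's own statement) =====
-- stated objective: alternative
-- what changed: Replaced A's single stateful pass with resetting counters by a two-stage algorithm: first chunk the sentence list into paragraph sublists of size max(per_paragraph, 1) by repeated slicing, then emit indices with a nested enumerate over paragraphs and their sentences.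
import Mathlib
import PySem

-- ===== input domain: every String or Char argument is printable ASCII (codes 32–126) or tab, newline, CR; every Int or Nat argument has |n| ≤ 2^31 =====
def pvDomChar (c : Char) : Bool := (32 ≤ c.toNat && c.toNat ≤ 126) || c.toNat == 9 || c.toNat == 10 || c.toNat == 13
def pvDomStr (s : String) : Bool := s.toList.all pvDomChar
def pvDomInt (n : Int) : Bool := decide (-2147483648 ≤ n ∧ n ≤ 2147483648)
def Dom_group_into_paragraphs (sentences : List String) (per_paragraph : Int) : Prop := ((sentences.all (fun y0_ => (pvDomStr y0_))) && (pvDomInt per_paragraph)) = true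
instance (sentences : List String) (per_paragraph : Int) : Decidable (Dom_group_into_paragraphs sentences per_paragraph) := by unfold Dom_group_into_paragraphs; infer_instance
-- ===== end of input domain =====

-- B replaces A's single stateful counter pass by a two-stage algorithm: chunk the list
-- into paragraph sublists of size max(per_paragraph, 1) by repeated slicing, then a
-- nested enumerate emits the indices (alternative decomposition; same cost).

-- ===== PORT A =====
-- literal port of A's loop: fold over the sentences carrying (result, para_idx, sent_idx)
def group_into_paragraphs (sentences : List String) (per_paragraph : Int) : List (Int × Int × String × Option String × Option String) :=
  (sentences.foldl
    (fun (st : List (Int × Int × String × Option String × Option String) × Int × Int) s =>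
      let result := st.1 ++ [(st.2.1, st.2.2, s, none, none)]
      let sent_idx := st.2.2 + 1
      if sent_idx ≥ per_paragraph then (result, st.2.1 + 1, 0) else (result, st.2.1, sent_idx))
    ([], 0, 0)).1

-- ===== PORT B =====
-- Source B's while loop: peel rest[:k] off rest (= rest[k:]) until rest is empty.
-- The proof argument 1 ≤ k only justifies termination (the Python loop terminates for the same reason).
def pvChunks (rest : List String) (k : Int) (hk : 1 ≤ k) : List (List String) :=
  if h : rest = [] then []
  else PySem.List.slice rest none (some k) :: pvChunks (PySem.List.slice rest (some k) none) k hk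
termination_by rest.length
decreasing_by
  rw [PySem.List.slice_from _ (by omega : (0:Int) ≤ k)]
  have : rest.length ≠ 0 := fun h0 => h (List.eq_nil_of_length_eq_zero h0)
  have : 1 ≤ k.toNat := by omega
  simp [List.length_drop]; omega

-- literal port of Source B: k = per_paragraph if ≥ 1 else 1; chunk; nested enumerate comprehension
def group_into_paragraphs_alt (sentences : List String) (per_paragraph : Int) : List (Int × Int × String × Option String × Option String) :=
  (PySem.List.enumerate
      (pvChunks sentences (if per_paragraph ≥ 1 then per_paragraph else 1) (by split <;> omega)) 0).flatMap
    (fun pp => (PySem.List.enumerate pp.2 0).map (fun ss => (pp.1, ss.1, ss.2, none, none)))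

-- ===== PRECONDITION & SPEC =====
def Spec_group_into_paragraphs (sentences : List String) (per_paragraph : Int) (out : List (Int × Int × String × Option String × Option String)) : Prop := out = group_into_paragraphs_alt sentences per_paragraph
instance (sentences : List String) (per_paragraph : Int) (out : List (Int × Int × String × Option String × Option String)) : Decidable (Spec_group_into_paragraphs sentences per_paragraph out) := by unfold Spec_group_into_paragraphs; infer_instance

-- ===== CLAIM (what is proved, stated in full; the proofs are below) =====
def Claim_equal_group_into_paragraphs : Prop := ∀ (sentences : List String) (per_paragraph : Int), Dom_group_into_paragraphs sentences per_paragraph → Spec_group_into_paragraphs sentences per_paragraph (group_into_paragraphs sentences per_paragraph)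

-- ===== LEMMAS AND PROOFS =====

-- abbreviation for A's loop body
def pvStepA (p : Int) (st : List (Int × Int × String × Option String × Option String) × Int × Int) (s : String) : List (Int × Int × String × Option String × Option String) × Int × Int :=
  let result := st.1 ++ [(st.2.1, st.2.2, s, none, none)]
  let sent_idx := st.2.2 + 1
  if sent_idx ≥ p then (result, st.2.1 + 1, 0) else (result, st.2.1, sent_idx)

-- the rows one paragraph contributes
def pvTagPara (para : Int) (ys : List String) : List (Int × Int × String × Option String × Option String) :=
  (PySem.List.enumerate ys 0).map (fun ss => (para, ss.1, ss.2, none, none))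

-- the rows a list of paragraphs contributes, paragraph indices from para on
def pvTag (para : Int) (cs : List (List String)) : List (Int × Int × String × Option String × Option String) :=
  match cs with
  | [] => []
  | c :: cs' => pvTagPara para c ++ pvTag (para + 1) cs'

-- B's flatMap over enumerate equals pvTag
theorem pvBalt_tag (cs : List (List String)) : ∀ (a : Int),
    (PySem.List.enumerate cs a).flatMap
      (fun pp => (PySem.List.enumerate pp.2 0).map (fun ss => (pp.1, ss.1, ss.2, none, none)))
    = pvTag a cs := by
  induction cs with
  | nil => intro a; simp [PySem.List.enumerate_nil, pvTag]
  | cons c t ih => intro a; simp [PySem.List.enumerate_cons, pvTag, pvTagPara, ih (a + 1)]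

-- A's fold through a strictly incomplete paragraph: counter just advances
theorem pvFill (p k : Int) (hk : k = if 1 ≤ p then p else 1) (ys : List String) :
    ∀ (j : Int) (acc : List (Int × Int × String × Option String × Option String)) (para : Int),
    0 ≤ j → j + ys.length < k →
    ys.foldl (pvStepA p) (acc, para, j)
      = (acc ++ (PySem.List.enumerate ys j).map (fun ss => (para, ss.1, ss.2, none, none)),
         para, j + ys.length) := by
  induction ys with
  | nil => intro j acc para _ _; simp [PySem.List.enumerate_nil]
  | cons s t ih =>
    intro j acc para hj hlen
    have hp : 1 ≤ p := by
      by_contra h; rw [if_neg h] at hk; simp at hlen; omega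
    rw [if_pos hp] at hk
    have hlt : ¬ (j + 1 ≥ p) := by simp at hlen ⊢; omega
    simp only [List.foldl_cons, pvStepA, if_neg hlt]
    rw [ih (j + 1) (acc ++ [(para, j, s, none, none)]) para (by omega) (by simp at hlen ⊢; omega)]
    simp [PySem.List.enumerate_cons]
    omega

-- A's fold through one exactly full paragraph: counter resets and paragraph advances
theorem pvFull (p k : Int) (hk : k = if 1 ≤ p then p else 1) (ys : List String) :
    ∀ (j : Int) (acc : List (Int × Int × String × Option String × Option String)) (para : Int),
    0 ≤ j → j + ys.length = k → ys ≠ [] →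
    ys.foldl (pvStepA p) (acc, para, j)
      = (acc ++ (PySem.List.enumerate ys j).map (fun ss => (para, ss.1, ss.2, none, none)),
         para + 1, 0) := by
  induction ys with
  | nil => intro _ _ _ _ _ h; exact absurd rfl h
  | cons s t ih =>
    intro j acc para hj hlen _
    cases t with
    | nil =>
      have hge : j + 1 ≥ p := by
        by_cases hp : 1 ≤ p
        · rw [if_pos hp] at hk; simp at hlen; omega
        · omega
      simp [pvStepA, if_pos hge, PySem.List.enumerate_cons, PySem.List.enumerate_nil]
    | cons s2 t2 =>
      have hp : 1 ≤ p := by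
        by_contra h; rw [if_neg h] at hk; simp at hlen; omega
      rw [if_pos hp] at hk
      have hlt : ¬ (j + 1 ≥ p) := by simp at hlen ⊢; omega
      rw [List.foldl_cons]
      have hstep : pvStepA p (acc, para, j) s = (acc ++ [(para, j, s, none, none)], para, j + 1) := by
        simp [pvStepA, hlt]
      rw [hstep, ih (j + 1) (acc ++ [(para, j, s, none, none)]) para (by omega)
            (by simp at hlen ⊢; omega) (by simp)]
      simp [PySem.List.enumerate_cons]

-- main invariant: A's fold from a fresh paragraph boundary produces pvTag of the chunks
theorem pvMain (p k : Int) (hk : k = if 1 ≤ p then p else 1) (hk1 : 1 ≤ k) :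
    ∀ (n : Nat) (l : List String), l.length = n →
    ∀ (acc : List (Int × Int × String × Option String × Option String)) (para : Int),
    (l.foldl (pvStepA p) (acc, para, 0)).1 = acc ++ pvTag para (pvChunks l k hk1) := by
  intro n
  induction n using Nat.strong_induction_on with
  | _ n ih =>
    intro l hn acc para
    by_cases hnil : l = []
    · subst hnil; rw [pvChunks]; simp [pvTag]
    · rw [pvChunks, dif_neg hnil]
      have htake := PySem.List.slice_to l (by omega : (0:Int) ≤ k)
      have hdrop := PySem.List.slice_from l (by omega : (0:Int) ≤ k)
      have hsplit : l = l.take k.toNat ++ l.drop k.toNat := (List.take_append_drop _ _).symm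
      by_cases hlen : l.length ≤ k.toNat
      · -- the whole remainder fits in one (possibly short) paragraph
        have hdropnil : l.drop k.toNat = [] := by simp [List.drop_eq_nil_iff]; omega
        rw [hdrop, hdropnil, pvChunks]
        simp only [pvTag, htake, List.take_of_length_le hlen]
        by_cases heq : (l.length : Int) = k
        · rw [pvFull p k hk l 0 acc para le_rfl (by omega) hnil]
          simp [pvTagPara, pvTag]
        · rw [pvFill p k hk l 0 acc para le_rfl (by omega)]
          simp [pvTagPara, pvTag]
      · -- one full paragraph, then recurse on the rest
        push Not at hlen
        have hlentake : (l.take k.toNat).length = k.toNat := by simp; omega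
        conv_lhs => rw [hsplit]
        rw [List.foldl_append]
        rw [pvFull p k hk (l.take k.toNat) 0 acc para le_rfl
              (by rw [hlentake]; omega)
              (by intro h; rw [h] at hlentake; simp at hlentake; omega)]
        rw [ih (l.drop k.toNat).length (by simp; omega) (l.drop k.toNat) rfl _ (para + 1)]
        rw [htake, hdrop, pvTag]
        simp [pvTagPara]

-- ===== VERDICT (by name: the statement is the Claim_ definition above) =====
theorem group_into_paragraphs_spec : Claim_equal_group_into_paragraphs := by
  intro sentences p _
  unfold Spec_group_into_paragraphs group_into_paragraphs group_into_paragraphs_alt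
  rw [pvBalt_tag]
  have h := pvMain p (if p ≥ 1 then p else 1) (by split <;> simp_all) (by split <;> omega)
              sentences.length sentences rfl [] 0
  simpa [pvStepA] using h
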